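-- pv_equiv track=rewrite | github.com/adriandavila/advent-of-code | 2023/day_02/part2.py | cube_conundrum_power
-- ===== SOURCE A (Python) =====
-- from typing import Literal
--
-- def cube_conundrum_power(games: list[int, list[list[tuple[int, Literal["blue"] | Literal["red"] | Literal["green"]]]]]) -> int:
--     def game_power(game: list[list[tuple[int, Literal["blue"] | Literal["red"] | Literal["green"]]]]) -> bool:
--         min_blue = 0
--         min_red = 0
--         min_green = 0
--
--         for batch in game:
--             blue_drawn = sum([d[0] for d in batch if d[1] == "blue"])
--             min_blue = max(min_blue, blue_drawn)
--
--             red_drawn = sum([d[0] for d in batch if d[1] == "red"])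
--             min_red = max(min_red, red_drawn)
--
--             green_drawn = sum([d[0] for d in batch if d[1] == "green"])
--             min_green = max(min_green, green_drawn)
--
--         return min_blue * min_red * min_green
--
--     return sum([game_power(g[1]) for g in games])
-- ===== SOURCE B (Python) =====
-- def cube_conundrum_power(games):
--     # pass 1: one flat sweep over every draw, tallying per-(game, batch, color) totals
--     sums = {}
--     for gi, (_, game) in enumerate(games):
--         for bi, batch in enumerate(game):
--             for n, c in batch:
--                 sums[(gi, bi, c)] = sums.get((gi, bi, c), 0) + n
--     # pass 2: fold the totals table into a per-(game, color) maxima table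
--     maxes = {}
--     for gi, (_, game) in enumerate(games):
--         for bi in range(len(game)):
--             for c in ("blue", "red", "green"):
--                 s = sums.get((gi, bi, c), 0)
--                 if s > maxes.get((gi, c), 0):
--                     maxes[(gi, c)] = s
--     # pass 3: read the answer off the maxima table
--     return sum(maxes.get((gi, "blue"), 0) * maxes.get((gi, "red"), 0) * maxes.get((gi, "green"), 0)
--                for gi in range(len(games)))
-- ===== Notes on version B (the rewrite author's own statement) =====
-- stated objective: alternative
-- what changed: B replaces A's per-game loop with three scalar running maxima by a staged pipeline over the whole input: one flat sweep tallies a global (game,batch,color)->sum table, a second pass folds it into a global (game,color)->max table, and a third pass reads the answer off that table.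
import Mathlib
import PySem

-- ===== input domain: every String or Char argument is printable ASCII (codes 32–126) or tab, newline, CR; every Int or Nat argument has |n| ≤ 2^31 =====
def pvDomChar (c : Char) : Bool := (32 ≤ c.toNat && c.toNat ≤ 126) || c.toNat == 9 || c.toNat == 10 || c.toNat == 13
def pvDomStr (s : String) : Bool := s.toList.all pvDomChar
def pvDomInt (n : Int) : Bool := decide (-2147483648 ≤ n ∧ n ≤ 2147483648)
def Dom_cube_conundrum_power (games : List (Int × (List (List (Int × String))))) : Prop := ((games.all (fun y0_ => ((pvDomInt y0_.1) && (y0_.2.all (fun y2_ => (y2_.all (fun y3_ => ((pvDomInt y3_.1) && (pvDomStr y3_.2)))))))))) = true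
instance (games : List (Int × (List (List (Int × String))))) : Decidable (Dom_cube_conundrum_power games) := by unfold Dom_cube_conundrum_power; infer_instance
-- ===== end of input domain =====

-- B replaces A's per-game loop (three scalar running maxima, three filtered sums per batch) by a
-- staged pipeline of global tables: a flat (game,batch,color)->sum table, then a (game,color)->max
-- table, then a read-off pass (objective: alternative).

-- ===== PORT A =====
-- game_power: fold over batches keeping three scalars; each batch summed three times by filter
def pvGamePowerA (game : List (List (Int × String))) : Int :=
  let s := game.foldl
    (fun (st : Int × Int × Int) batch =>
      let blue_drawn := ((batch.filter (fun d => d.2 == "blue")).map (fun d => d.1)).sum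
      let min_blue := max st.1 blue_drawn
      let red_drawn := ((batch.filter (fun d => d.2 == "red")).map (fun d => d.1)).sum
      let min_red := max st.2.1 red_drawn
      let green_drawn := ((batch.filter (fun d => d.2 == "green")).map (fun d => d.1)).sum
      let min_green := max st.2.2 green_drawn
      (min_blue, min_red, min_green))
    (0, 0, 0)
  s.1 * s.2.1 * s.2.2

def cube_conundrum_power (games : List (Int × (List (List (Int × String))))) : Int :=
  (games.map (fun g => pvGamePowerA g.2)).sum

-- ===== PORT B =====
-- the tuple ("blue", "red", "green") of pass 2
def pvB_colors : List String := ["blue", "red", "green"]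

-- innermost loop of pass 1: tally the draws of one batch into the flat sums table
def pvB_draws (gi bi : Int) (batch : List (Int × String))
    (d : PySem.Dict (Int × Int × String) Int) : PySem.Dict (Int × Int × String) Int :=
  batch.foldl (fun d p => d.insert (gi, bi, p.2) (d.getD (gi, bi, p.2) 0 + p.1)) d

-- 'for bi, batch in enumerate(game)' of pass 1 (bi is the running enumerate counter)
def pvB_pass1Game (gi bi : Int) (game : List (List (Int × String)))
    (d : PySem.Dict (Int × Int × String) Int) : PySem.Dict (Int × Int × String) Int :=
  match game with
  | [] => d
  | b :: rest => pvB_pass1Game gi (bi + 1) rest (pvB_draws gi bi b d)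

-- 'for gi, (_, game) in enumerate(games)' of pass 1
def pvB_pass1 (gi : Int) (gs : List (Int × (List (List (Int × String)))))
    (d : PySem.Dict (Int × Int × String) Int) : PySem.Dict (Int × Int × String) Int :=
  match gs with
  | [] => d
  | g :: rest => pvB_pass1 (gi + 1) rest (pvB_pass1Game gi 0 g.2 d)

-- innermost loop of pass 2: the three colors of one (game, batch) slot
def pvB_colorStep (sums : PySem.Dict (Int × Int × String) Int) (gi bi : Int)
    (m : PySem.Dict (Int × String) Int) : PySem.Dict (Int × String) Int :=
  pvB_colors.foldl (fun m c =>
    let s := sums.getD (gi, bi, c) 0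
    if s > m.getD (gi, c) 0 then m.insert (gi, c) s else m) m

-- 'for bi in range(len(game))' of pass 2
def pvB_pass2Game (sums : PySem.Dict (Int × Int × String) Int) (gi bi : Int)
    (game : List (List (Int × String))) (m : PySem.Dict (Int × String) Int) :
    PySem.Dict (Int × String) Int :=
  match game with
  | [] => m
  | _ :: rest => pvB_pass2Game sums gi (bi + 1) rest (pvB_colorStep sums gi bi m)

-- 'for gi, (_, game) in enumerate(games)' of pass 2
def pvB_pass2 (sums : PySem.Dict (Int × Int × String) Int) (gi : Int)
    (gs : List (Int × (List (List (Int × String))))) (m : PySem.Dict (Int × String) Int) :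
    PySem.Dict (Int × String) Int :=
  match gs with
  | [] => m
  | g :: rest => pvB_pass2 sums (gi + 1) rest (pvB_pass2Game sums gi 0 g.2 m)

-- pass 3: 'sum(... for gi in range(len(games)))'
def pvB_pass3 (maxes : PySem.Dict (Int × String) Int) (gi : Int)
    (gs : List (Int × (List (List (Int × String))))) : Int :=
  match gs with
  | [] => 0
  | _ :: rest =>
    maxes.getD (gi, "blue") 0 * maxes.getD (gi, "red") 0 * maxes.getD (gi, "green") 0 +
      pvB_pass3 maxes (gi + 1) rest

def cube_conundrum_power_alt (games : List (Int × (List (List (Int × String))))) : Int :=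
  let sums := pvB_pass1 0 games PySem.Dict.empty
  let maxes := pvB_pass2 sums 0 games PySem.Dict.empty
  pvB_pass3 maxes 0 games

-- ===== PRECONDITION & SPEC =====
def Spec_cube_conundrum_power (games : List (Int × (List (List (Int × String))))) (out : Int) : Prop := out = cube_conundrum_power_alt games
instance (games : List (Int × (List (List (Int × String))))) (out : Int) : Decidable (Spec_cube_conundrum_power games out) := by unfold Spec_cube_conundrum_power; infer_instance

-- ===== CLAIM (what is proved, stated in full; the proofs are below) =====
def Claim_equal_cube_conundrum_power : Prop := ∀ (games : List (Int × (List (List (Int × String))))), Dom_cube_conundrum_power games → Spec_cube_conundrum_power games (cube_conundrum_power games)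

-- ===== LEMMAS AND PROOFS =====

-- the sum of the c-colored draws of one batch (A's filtered comprehension)
def pvBatchSum (c : String) (batch : List (Int × String)) : Int :=
  ((batch.filter (fun d => d.2 == c)).map (fun d => d.1)).sum

-- contribution of pass 1 over one game (batches numbered from bi) to the key (g, b, c)
def pvCG (gi bi : Int) (game : List (List (Int × String))) (g b : Int) (c : String) : Int :=
  match game with
  | [] => 0
  | batch :: rest => (if g = gi ∧ b = bi then pvBatchSum c batch else 0) + pvCG gi (bi + 1) rest g b c

-- contribution of pass 1 over games numbered from gi to the key (g, b, c)
def pvCA (gi : Int) (gs : List (Int × (List (List (Int × String))))) (g b : Int) (c : String) : Int :=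
  match gs with
  | [] => 0
  | gm :: rest => pvCG gi 0 gm.2 g b c + pvCA (gi + 1) rest g b c

theorem pvB_draws_getD (batch : List (Int × String)) (gi bi g b : Int) (c : String) :
    ∀ d : PySem.Dict (Int × Int × String) Int,
      (pvB_draws gi bi batch d).getD (g, b, c) 0 =
        d.getD (g, b, c) 0 + (if g = gi ∧ b = bi then pvBatchSum c batch else 0) := by
  induction batch with
  | nil => intro d; simp [pvB_draws, pvBatchSum]
  | cons p rest ih =>
    intro d
    have step : pvB_draws gi bi (p :: rest) d =
        pvB_draws gi bi rest (d.insert (gi, bi, p.2) (d.getD (gi, bi, p.2) 0 + p.1)) := rfl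
    rw [step, ih, PySem.Dict.getD_insert]
    by_cases hgb : g = gi ∧ b = bi
    · obtain ⟨rfl, rfl⟩ := hgb
      by_cases hc : c = p.2
      · subst hc
        rw [if_pos rfl, if_pos ⟨rfl, rfl⟩, if_pos ⟨rfl, rfl⟩]
        simp [pvBatchSum]
        ring
      · rw [if_neg (by simp only [Prod.mk.injEq]; tauto), if_pos ⟨rfl, rfl⟩, if_pos ⟨rfl, rfl⟩]
        have hfc : pvBatchSum c (p :: rest) = pvBatchSum c rest := by
          simp [pvBatchSum, Ne.symm hc]
        rw [hfc]
    · rw [if_neg (by simp only [Prod.mk.injEq]; tauto), if_neg hgb, if_neg hgb]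

theorem pvB_pass1Game_getD (game : List (List (Int × String))) (gi : Int) (g b : Int) (c : String) :
    ∀ (bi : Int) (d : PySem.Dict (Int × Int × String) Int),
      (pvB_pass1Game gi bi game d).getD (g, b, c) 0 =
        d.getD (g, b, c) 0 + pvCG gi bi game g b c := by
  induction game with
  | nil => intro bi d; simp [pvB_pass1Game, pvCG]
  | cons batch rest ih =>
    intro bi d
    rw [show pvB_pass1Game gi bi (batch :: rest) d =
          pvB_pass1Game gi (bi + 1) rest (pvB_draws gi bi batch d) from rfl,
        ih, pvB_draws_getD]
    simp [pvCG]; ring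

theorem pvB_pass1_getD (gs : List (Int × (List (List (Int × String))))) (g b : Int) (c : String) :
    ∀ (gi : Int) (d : PySem.Dict (Int × Int × String) Int),
      (pvB_pass1 gi gs d).getD (g, b, c) 0 = d.getD (g, b, c) 0 + pvCA gi gs g b c := by
  induction gs with
  | nil => intro gi d; simp [pvB_pass1, pvCA]
  | cons gm rest ih =>
    intro gi d
    rw [show pvB_pass1 gi (gm :: rest) d = pvB_pass1 (gi + 1) rest (pvB_pass1Game gi 0 gm.2 d) from rfl,
        ih, pvB_pass1Game_getD]
    simp [pvCA]; ring

theorem pvCG_zero (game : List (List (Int × String))) (gi g b : Int) (c : String) :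
    ∀ bi : Int, (g ≠ gi ∨ b < bi) → pvCG gi bi game g b c = 0 := by
  induction game with
  | nil => intro bi _; rfl
  | cons batch rest ih =>
    intro bi h
    have h1 : ¬ (g = gi ∧ b = bi) := by rcases h with h | h <;> [tauto; omega]
    have h2 : g ≠ gi ∨ b < bi + 1 := by rcases h with h | h <;> [exact Or.inl h; exact Or.inr (by omega)]
    simp [pvCG, h1, ih (bi + 1) h2]

theorem pvCG_eval (game : List (List (Int × String))) (gi : Int) (c : String) :
    ∀ (bi : Int) (j : Nat) (hj : j < game.length),
      pvCG gi bi game gi (bi + (j : Int)) c = pvBatchSum c game[j] := by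
  induction game with
  | nil => intro bi j hj; simp at hj
  | cons batch rest ih =>
    intro bi j hj
    cases j with
    | zero =>
      have hz := pvCG_zero rest gi gi bi c (bi + 1) (by omega)
      simp [pvCG, hz]
    | succ j =>
      have hj' : j < rest.length := by simpa using Nat.lt_of_succ_lt_succ hj
      simp only [pvCG, List.getElem_cons_succ]
      rw [if_neg (show ¬ (True ∧ bi + ((j + 1 : Nat) : Int) = bi) from by simp only [true_and]; push_cast; omega)]
      rw [show bi + ((j + 1 : Nat) : Int) = (bi + 1) + (j : Int) from by push_cast; ring,
          ih (bi + 1) j hj']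
      ring

theorem pvCA_zero (gs : List (Int × (List (List (Int × String))))) (g b : Int) (c : String) :
    ∀ gi : Int, g < gi → pvCA gi gs g b c = 0 := by
  induction gs with
  | nil => intro gi _; rfl
  | cons gm rest ih =>
    intro gi h
    rw [show pvCA gi (gm :: rest) g b c = pvCG gi 0 gm.2 g b c + pvCA (gi + 1) rest g b c from rfl,
        pvCG_zero gm.2 gi g b c 0 (Or.inl (by omega)), ih (gi + 1) (by omega)]
    ring

theorem pvCA_eval (gs : List (Int × (List (List (Int × String))))) (b : Int) (c : String) :
    ∀ (gi : Int) (i : Nat) (hi : i < gs.length),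
      pvCA gi gs (gi + (i : Int)) b c = pvCG (gi + (i : Int)) 0 gs[i].2 (gi + (i : Int)) b c := by
  induction gs with
  | nil => intro gi i hi; simp at hi
  | cons gm rest ih =>
    intro gi i hi
    cases i with
    | zero =>
      simp only [pvCA, List.getElem_cons_zero]
      rw [pvCA_zero rest (gi + ((0 : Nat) : Int)) b c (gi + 1) (by omega)]
      simp
    | succ i =>
      have hi' : i < rest.length := by simpa using Nat.lt_of_succ_lt_succ hi
      simp only [pvCA, List.getElem_cons_succ]
      rw [pvCG_zero gm.2 gi (gi + ((i + 1 : Nat) : Int)) b c 0 (Or.inl (by push_cast; omega))]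
      rw [show gi + ((i + 1 : Nat) : Int) = (gi + 1) + (i : Int) from by push_cast; ring,
          ih (gi + 1) i hi']
      ring

-- reading the finished flat sums table at an in-range key gives that batch's color sum
theorem pvSums_read (games : List (Int × (List (List (Int × String))))) (i j : Nat) (c : String)
    (hi : i < games.length) (hj : j < games[i].2.length) :
    (pvB_pass1 0 games PySem.Dict.empty).getD ((i : Int), (j : Int), c) 0 =
      pvBatchSum c (games[i].2[j]) := by
  rw [pvB_pass1_getD]
  have h1 := pvCA_eval games (j : Int) c 0 i hi
  have h2 := pvCG_eval games[i].2 ((i : Int)) c 0 j hj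
  simp only [zero_add] at h1 h2
  simp [h1, h2]

-- max chain of pass 2 over one game's batch slots (batches numbered from bi), for one color
def pvAmax (sums : PySem.Dict (Int × Int × String) Int) (gi bi : Int)
    (game : List (List (Int × String))) (c : String) (cur : Int) : Int :=
  match game with
  | [] => cur
  | _ :: rest => pvAmax sums gi (bi + 1) rest c (max cur (sums.getD (gi, bi, c) 0))

-- pass 2 over games numbered from gi, effect on the (g, c) entry
def pvGmax (sums : PySem.Dict (Int × Int × String) Int) (gi : Int)
    (gs : List (Int × (List (List (Int × String))))) (g : Int) (c : String) (cur : Int) : Int :=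
  match gs with
  | [] => cur
  | gm :: rest => pvGmax sums (gi + 1) rest g c (if g = gi then pvAmax sums gi 0 gm.2 c cur else cur)

theorem pvB_colorStep_getD (sums : PySem.Dict (Int × Int × String) Int) (gi bi : Int)
    (m : PySem.Dict (Int × String) Int) (g : Int) (c : String)
    (hc : c = "blue" ∨ c = "red" ∨ c = "green") :
    (pvB_colorStep sums gi bi m).getD (g, c) 0 =
      if g = gi then max (m.getD (g, c) 0) (sums.getD (gi, bi, c) 0) else m.getD (g, c) 0 := by
  by_cases hg : g = gi <;>
    rcases hc with rfl | rfl | rfl <;>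
      simp only [pvB_colorStep, pvB_colors, List.foldl_cons, List.foldl_nil] <;>
        split_ifs <;>
          simp_all [PySem.Dict.getD_insert, Prod.ext_iff] <;> omega

theorem pvB_pass2Game_getD (game : List (List (Int × String)))
    (sums : PySem.Dict (Int × Int × String) Int) (gi : Int) (g : Int) (c : String)
    (hc : c = "blue" ∨ c = "red" ∨ c = "green") :
    ∀ (bi : Int) (m : PySem.Dict (Int × String) Int),
      (pvB_pass2Game sums gi bi game m).getD (g, c) 0 =
        if g = gi then pvAmax sums gi bi game c (m.getD (g, c) 0) else m.getD (g, c) 0 := by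
  induction game with
  | nil => intro bi m; simp [pvB_pass2Game, pvAmax]
  | cons batch rest ih =>
    intro bi m
    rw [show pvB_pass2Game sums gi bi (batch :: rest) m =
          pvB_pass2Game sums gi (bi + 1) rest (pvB_colorStep sums gi bi m) from rfl,
        ih, pvB_colorStep_getD sums gi bi m g c hc]
    by_cases hg : g = gi <;> simp [hg, pvAmax]

theorem pvB_pass2_getD (gs : List (Int × (List (List (Int × String)))))
    (sums : PySem.Dict (Int × Int × String) Int) (g : Int) (c : String)
    (hc : c = "blue" ∨ c = "red" ∨ c = "green") :
    ∀ (gi : Int) (m : PySem.Dict (Int × String) Int),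
      (pvB_pass2 sums gi gs m).getD (g, c) 0 = pvGmax sums gi gs g c (m.getD (g, c) 0) := by
  induction gs with
  | nil => intro gi m; simp [pvB_pass2, pvGmax]
  | cons gm rest ih =>
    intro gi m
    rw [show pvB_pass2 sums gi (gm :: rest) m =
          pvB_pass2 sums (gi + 1) rest (pvB_pass2Game sums gi 0 gm.2 m) from rfl,
        ih, pvB_pass2Game_getD gm.2 sums gi g c hc]
    rfl

theorem pvGmax_zero (sums : PySem.Dict (Int × Int × String) Int)
    (gs : List (Int × (List (List (Int × String))))) (g : Int) (c : String) :
    ∀ (gi : Int) (cur : Int), g < gi → pvGmax sums gi gs g c cur = cur := by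
  induction gs with
  | nil => intro gi cur _; rfl
  | cons gm rest ih =>
    intro gi cur h
    have hne : g ≠ gi := by omega
    rw [show pvGmax sums gi (gm :: rest) g c cur =
          pvGmax sums (gi + 1) rest g c (if g = gi then pvAmax sums gi 0 gm.2 c cur else cur)
          from rfl]
    simp [hne, ih (gi + 1) cur (by omega)]

theorem pvGmax_eval (sums : PySem.Dict (Int × Int × String) Int)
    (gs : List (Int × (List (List (Int × String))))) (c : String) :
    ∀ (gi : Int) (i : Nat) (hi : i < gs.length) (cur : Int),
      pvGmax sums gi gs (gi + (i : Int)) c cur = pvAmax sums (gi + (i : Int)) 0 gs[i].2 c cur := by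
  induction gs with
  | nil => intro gi i hi cur; simp at hi
  | cons gm rest ih =>
    intro gi i hi cur
    cases i with
    | zero =>
      simp only [pvGmax, List.getElem_cons_zero]
      rw [if_pos (show gi + ((0 : Nat) : Int) = gi from by push_cast; ring),
          pvGmax_zero sums rest (gi + ((0 : Nat) : Int)) c (gi + 1) _ (by omega)]
      simp
    | succ i =>
      have hi' : i < rest.length := by simpa using Nat.lt_of_succ_lt_succ hi
      simp only [pvGmax, List.getElem_cons_succ]
      rw [if_neg (show ¬ gi + ((i + 1 : Nat) : Int) = gi from by push_cast; omega)]
      rw [show gi + ((i + 1 : Nat) : Int) = (gi + 1) + (i : Int) from by push_cast; ring,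
          ih (gi + 1) i hi' cur]

-- A's running maximum of the per-batch color sums, as a fold
def pvFoldMax (c : String) (game : List (List (Int × String))) (cur : Int) : Int :=
  match game with
  | [] => cur
  | batch :: rest => pvFoldMax c rest (max cur (pvBatchSum c batch))

theorem pvAmax_spec (game : List (List (Int × String)))
    (sums : PySem.Dict (Int × Int × String) Int) (gi : Int) (c : String) :
    ∀ (bi cur : Int),
      (∀ (k : Nat) (hk : k < game.length),
        sums.getD (gi, bi + (k : Int), c) 0 = pvBatchSum c game[k]) →
      pvAmax sums gi bi game c cur = pvFoldMax c game cur := by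
  induction game with
  | nil => intro bi cur _; rfl
  | cons batch rest ih =>
    intro bi cur H
    have h0 := H 0 (by simp)
    simp only [Nat.cast_zero, add_zero, List.getElem_cons_zero] at h0
    rw [show pvAmax sums gi bi (batch :: rest) c cur =
          pvAmax sums gi (bi + 1) rest c (max cur (sums.getD (gi, bi, c) 0)) from rfl,
        h0, show pvFoldMax c (batch :: rest) cur =
          pvFoldMax c rest (max cur (pvBatchSum c batch)) from rfl]
    apply ih
    intro k hk
    have := H (k + 1) (by simpa using Nat.succ_lt_succ hk)
    push_cast at this ⊢
    rw [show bi + 1 + (k : Int) = bi + ((k : Int) + 1) by ring]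
    simpa using this

-- A's fold over one game computes the three per-color running maxima
theorem pvA_fold (game : List (List (Int × String))) :
    ∀ mb mr mg : Int,
      game.foldl
        (fun (st : Int × Int × Int) batch =>
          let blue_drawn := ((batch.filter (fun d => d.2 == "blue")).map (fun d => d.1)).sum
          let min_blue := max st.1 blue_drawn
          let red_drawn := ((batch.filter (fun d => d.2 == "red")).map (fun d => d.1)).sum
          let min_red := max st.2.1 red_drawn
          let green_drawn := ((batch.filter (fun d => d.2 == "green")).map (fun d => d.1)).sum
          let min_green := max st.2.2 green_drawn
          (min_blue, min_red, min_green))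
        (mb, mr, mg) =
      (pvFoldMax "blue" game mb, pvFoldMax "red" game mr, pvFoldMax "green" game mg) := by
  induction game with
  | nil => intro mb mr mg; rfl
  | cons batch rest ih =>
    intro mb mr mg
    simp only [List.foldl_cons]
    rw [ih]
    rfl

theorem pvGamePowerA_eq (game : List (List (Int × String))) :
    pvGamePowerA game =
      pvFoldMax "blue" game 0 * pvFoldMax "red" game 0 * pvFoldMax "green" game 0 := by
  unfold pvGamePowerA
  rw [pvA_fold game 0 0 0]

-- pass 3 reads off the per-game powers whenever the maxima table is correct at every game index
theorem pvB_pass3_spec (gs : List (Int × (List (List (Int × String)))))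
    (maxes : PySem.Dict (Int × String) Int) :
    ∀ gi : Int,
      (∀ (k : Nat) (hk : k < gs.length) (c : String), (c = "blue" ∨ c = "red" ∨ c = "green") →
        maxes.getD (gi + (k : Int), c) 0 = pvFoldMax c gs[k].2 0) →
      pvB_pass3 maxes gi gs = (gs.map (fun g => pvGamePowerA g.2)).sum := by
  induction gs with
  | nil => intro gi _; rfl
  | cons gm rest ih =>
    intro gi H
    have hb := H 0 (by simp) "blue" (by tauto)
    have hr := H 0 (by simp) "red" (by tauto)
    have hg := H 0 (by simp) "green" (by tauto)
    simp only [Nat.cast_zero, add_zero, List.getElem_cons_zero] at hb hr hg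
    rw [show pvB_pass3 maxes gi (gm :: rest) =
          maxes.getD (gi, "blue") 0 * maxes.getD (gi, "red") 0 * maxes.getD (gi, "green") 0 +
            pvB_pass3 maxes (gi + 1) rest from rfl,
        hb, hr, hg, ih (gi + 1) ?_]
    · simp [pvGamePowerA_eq]
    · intro k hk c hc
      have := H (k + 1) (by simpa using Nat.succ_lt_succ hk) c hc
      push_cast at this ⊢
      rw [show gi + 1 + (k : Int) = gi + ((k : Int) + 1) by ring]
      simpa using this

-- ===== VERDICT (by name: the statement is the Claim_ definition above) =====
theorem cube_conundrum_power_spec : Claim_equal_cube_conundrum_power := by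
  intro games _
  unfold Spec_cube_conundrum_power cube_conundrum_power cube_conundrum_power_alt
  refine (pvB_pass3_spec games _ 0 ?_).symm
  intro k hk c hc
  rw [pvB_pass2_getD games _ _ c hc 0 PySem.Dict.empty]
  simp only [PySem.Dict.getD_empty, zero_add]
  have h1 := pvGmax_eval (pvB_pass1 0 games PySem.Dict.empty) games c 0 k hk 0
  simp only [zero_add] at h1
  rw [h1]
  apply pvAmax_spec
  intro j hj
  simp only [zero_add]
  exact pvSums_read games k j c hk hj
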